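-- pv_equiv track=rewrite | github.com/creatis-myriad/ASCENT | ascent/postprocessing/postprocessing.py | correct_innacurate_classif
-- ===== SOURCE A (Python) =====
-- def correct_innacurate_classif(liste):
--     n = len(liste)
--     if n == 0:
--         return liste
--
--     # Find index for first and last 1
--     debut = -1
--     fin = -1
--     for i in range(n):
--         if liste[i] == 1:
--             debut = i
--             break
--
--     for i in range(n - 1, -1, -1):
--         if liste[i] == 1:
--             fin = i
--             break
--
--     if debut != -1 and fin != -1 and debut < fin:
--         for i in range(debut, fin + 1):
--             if liste[i] == 0:
--                 liste[i] = 1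
--
--     return liste
-- ===== SOURCE B (Python) =====
-- def correct_innacurate_classif(liste):
--     # one pass: a 0 becomes 1 iff a 1 was already seen and another 1 remains ahead
--     seen = False
--     remaining = liste.count(1)
--     out = []
--     for x in liste:
--         if x == 1:
--             remaining -= 1
--             seen = True
--             out.append(1)
--         elif x == 0 and seen and remaining > 0:
--             out.append(1)
--         else:
--             out.append(x)
--     return out
-- ===== Notes on version B (the rewrite author's own statement) =====
-- stated objective: alternative
-- what changed: Replaces A's three index passes (scan for the first 1, reverse scan for the last 1, then an index-range fill loop) by a single forward pass over the elements that keeps a seen-a-1 flag and a count of 1s remaining ahead, building a new list instead of mutating in place (return values are identical).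
import Mathlib
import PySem

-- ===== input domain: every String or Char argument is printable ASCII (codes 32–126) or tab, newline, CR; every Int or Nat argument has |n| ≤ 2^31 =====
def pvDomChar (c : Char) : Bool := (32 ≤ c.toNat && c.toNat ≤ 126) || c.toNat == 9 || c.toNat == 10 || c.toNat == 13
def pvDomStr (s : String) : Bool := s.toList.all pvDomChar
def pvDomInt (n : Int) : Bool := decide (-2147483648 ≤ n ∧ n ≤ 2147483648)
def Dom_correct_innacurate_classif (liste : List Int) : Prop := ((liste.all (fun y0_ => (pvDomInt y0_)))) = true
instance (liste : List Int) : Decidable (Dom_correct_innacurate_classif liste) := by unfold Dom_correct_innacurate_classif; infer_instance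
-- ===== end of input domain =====

-- B replaces A's three index passes (find first 1, find last 1, fill the index range)
-- by a single forward pass keeping a 'seen a 1' flag and a count of the 1s remaining ahead.
-- A mutates its argument in place and returns it; B builds a new list — the equivalence
-- proved here is about the RETURN value only.

-- ===== PORT A =====
-- for i in range(n): if liste[i] == 1: debut = i; break   (index of the first 1, else -1)
def pvFirstOne : List Int → Int
  | [] => -1
  | x :: xs =>
    if x = 1 then 0
    else
      let r := pvFirstOne xs
      if r = -1 then -1 else r + 1

-- for i in range(n-1, -1, -1): if liste[i] == 1: fin = i; break   (index of the last 1, else -1)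
def pvLastOne : List Int → Int
  | [] => -1
  | x :: xs =>
    let r := pvLastOne xs
    if r = -1 then (if x = 1 then 0 else -1) else r + 1

-- loop body: if liste[i] == 0: liste[i] = 1
def pvFillStep (acc : List Int) (i : Int) : List Int :=
  if PySem.List.pyGet? acc i = some 0 then acc.set i.toNat 1 else acc

def correct_innacurate_classif (liste : List Int) : List Int :=
  if liste.length = 0 then liste
  else
    let debut := pvFirstOne liste
    let fin := pvLastOne liste
    if debut ≠ -1 ∧ fin ≠ -1 ∧ debut < fin then
      (PySem.List.pyRange debut (fin + 1) 1).foldl pvFillStep liste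
    else liste

-- ===== PORT B =====
-- state: (out, seen, remaining)
def pvStepB (acc : List Int × Bool × Int) (x : Int) : List Int × Bool × Int :=
  if x = 1 then (acc.1 ++ [1], true, acc.2.2 - 1)
  else if x = 0 ∧ acc.2.1 = true ∧ 0 < acc.2.2 then (acc.1 ++ [1], acc.2.1, acc.2.2)
  else (acc.1 ++ [x], acc.2.1, acc.2.2)

def correct_innacurate_classif_alt (liste : List Int) : List Int :=
  (liste.foldl pvStepB ([], false, ((PySem.List.count liste 1 : Nat) : Int))).1

-- ===== PRECONDITION & SPEC =====
def Spec_correct_innacurate_classif (liste : List Int) (out : List Int) : Prop := out = correct_innacurate_classif_alt liste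
instance (liste : List Int) (out : List Int) : Decidable (Spec_correct_innacurate_classif liste out) := by unfold Spec_correct_innacurate_classif; infer_instance

-- ===== CLAIM (what is proved, stated in full; the proofs are below) =====
def Claim_equal_correct_innacurate_classif : Prop := ∀ (liste : List Int), Dom_correct_innacurate_classif liste → Spec_correct_innacurate_classif liste (correct_innacurate_classif liste)

-- ===== LEMMAS AND PROOFS =====

-- common normal form of both programs: one structural pass
def pvSpec : Bool → List Int → List Int
  | _, [] => []
  | seen, x :: xs =>
    (if x = 1 then 1 else if x = 0 ∧ seen = true ∧ 1 ∈ xs then 1 else x) :: pvSpec (seen || (x == 1)) xs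

theorem pvB_go (xs : List Int) : ∀ (out : List Int) (seen : Bool),
    (xs.foldl pvStepB (out, seen, ((List.count 1 xs : Nat) : Int))).1 = out ++ pvSpec seen xs := by
  induction xs with
  | nil => intro out seen; simp [pvSpec]
  | cons x xs ih =>
    intro out seen
    simp only [List.foldl_cons]
    by_cases hx : x = 1
    · subst hx
      have hstep : pvStepB (out, seen, ((List.count 1 (1 :: xs) : Nat) : Int)) 1 =
          (out ++ [1], true, ((List.count 1 xs : Nat) : Int)) := by
        simp [pvStepB, List.count_cons]
      rw [hstep, ih (out ++ [1]) true]
      simp [pvSpec]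
    · have hcnt : ((List.count 1 (x :: xs) : Nat) : Int) = ((List.count 1 xs : Nat) : Int) := by
        simp [List.count_cons, hx]
      have hseen : (seen || (x == 1)) = seen := by simp [hx]
      by_cases hg : x = 0 ∧ seen = true ∧ 1 ∈ xs
      · have hpos : (0 : Int) < ((List.count 1 xs : Nat) : Int) := by
          exact_mod_cast List.count_pos_iff.mpr hg.2.2
        have hstep : pvStepB (out, seen, ((List.count 1 (x :: xs) : Nat) : Int)) x =
            (out ++ [1], seen, ((List.count 1 xs : Nat) : Int)) := by
          rw [hcnt]; simp [pvStepB, hx, hg.1, hg.2.1, hpos, hg.2.2]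
        rw [hstep, ih (out ++ [1]) seen]
        simp [pvSpec, hx, hg.1, hg.2.1, hg.2.2, hseen]
      · have hnpos : ¬ (x = 0 ∧ seen = true ∧ 0 < ((List.count 1 (x :: xs) : Nat) : Int)) := by
          rw [hcnt]; intro h
          exact hg ⟨h.1, h.2.1, List.count_pos_iff.mp (by exact_mod_cast h.2.2)⟩
        have hstep : pvStepB (out, seen, ((List.count 1 (x :: xs) : Nat) : Int)) x =
            (out ++ [x], seen, ((List.count 1 (x :: xs) : Nat) : Int)) := by
          simp [pvStepB, hx]
          intro h1 h2 h3
          exact absurd ⟨h1, h2, h3⟩ hg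
        rw [hstep, hcnt, ih (out ++ [x]) seen]
        have helem : (if x = 1 then (1 : Int) else if x = 0 ∧ seen = true ∧ 1 ∈ xs then 1 else x) = x := by
          simp [hx, hg]
        simp [pvSpec, hseen, helem]

theorem pvB_eq (l : List Int) : correct_innacurate_classif_alt l = pvSpec false l := by
  have := pvB_go l [] false
  simpa [correct_innacurate_classif_alt, PySem.List.count_eq] using this

theorem pvSpec_get (l : List Int) : ∀ (seen : Bool) (k : Nat),
    (pvSpec seen l)[k]? = (l[k]?).map (fun x =>
      if x = 1 then 1 else
      if x = 0 ∧ (seen = true ∨ 1 ∈ l.take k) ∧ 1 ∈ l.drop (k + 1) then 1 else x) := by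
  induction l with
  | nil => intro seen k; simp [pvSpec]
  | cons x xs ih =>
    intro seen k
    cases k with
    | zero => simp [pvSpec]
    | succ k =>
      have hx1 : ((seen || (x == 1)) = true) ↔ (seen = true ∨ x = 1) := by
        cases seen <;> simp
      have := ih (seen || (x == 1)) k
      simp only [pvSpec, List.getElem?_cons_succ, this, List.take_succ_cons, List.drop_succ_cons]
      congr 1
      funext y
      by_cases hy1 : y = 1
      · simp [hy1]
      · simp only [if_neg hy1]
        congr 1
        have : (1 ∈ x :: List.take k xs) ↔ (x = 1 ∨ 1 ∈ List.take k xs) := by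
          constructor
          · intro h; rcases List.mem_cons.mp h with h | h
            · exact Or.inl h.symm
            · exact Or.inr h
          · intro h; rcases h with h | h
            · exact List.mem_cons.mpr (Or.inl h.symm)
            · exact List.mem_cons.mpr (Or.inr h)
        simp [hx1, this]
        tauto

theorem pvFirst_cases (l : List Int) : pvFirstOne l = -1 ∨ 0 ≤ pvFirstOne l := by
  induction l with
  | nil => simp [pvFirstOne]
  | cons x xs ih =>
    simp only [pvFirstOne]
    split
    · right; omega
    · rcases ih with h | h <;> simp [h] <;> omega

theorem pvLast_cases (l : List Int) : pvLastOne l = -1 ∨ 0 ≤ pvLastOne l := by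
  induction l with
  | nil => simp [pvLastOne]
  | cons x xs ih =>
    simp only [pvLastOne]
    rcases ih with h | h
    · simp [h]; split <;> omega
    · have : ¬ pvLastOne xs = -1 := by omega
      simp [this]; omega

theorem pvFirst_take_iff (l : List Int) : ∀ (k : Nat),
    (1 ∈ l.take k) ↔ (0 ≤ pvFirstOne l ∧ pvFirstOne l < (k : Int)) := by
  induction l with
  | nil => intro k; simp [pvFirstOne]
  | cons x xs ih =>
    intro k
    cases k with
    | zero => simp
    | succ k =>
      simp only [List.take_succ_cons, List.mem_cons, pvFirstOne]
      by_cases hx : x = 1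
      · simp [hx] <;> omega
      · have hx' : ¬ (1 = x) := fun h => hx h.symm
        rcases pvFirst_cases xs with h | h
        · simp [hx, hx', h, ih k] <;> omega
        · have hne : ¬ pvFirstOne xs = -1 := by omega
          simp [hx, hx', hne, ih k] <;> omega

theorem pvLast_drop_iff (l : List Int) : ∀ (k : Nat),
    (1 ∈ l.drop k) ↔ ((k : Int) ≤ pvLastOne l) := by
  induction l with
  | nil => intro k; simp [pvLastOne]; omega
  | cons x xs ih =>
    intro k
    cases k with
    | zero =>
      simp only [List.drop_zero, List.mem_cons, pvLastOne]
      rcases pvLast_cases xs with h | h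
      · have hxs : ¬ (1 ∈ xs) := by
          intro hm
          have := (ih 0).mp (by simpa using hm)
          omega
        simp [h, hxs]
        constructor
        · intro h1; simp [← h1]
        · intro h1; split at h1 <;> omega
      · have hne : ¬ pvLastOne xs = -1 := by omega
        have hxs : 1 ∈ xs := (ih 0).mpr (by simpa using h)
        simp [hne, hxs]; omega
    | succ k =>
      simp only [List.drop_succ_cons, pvLastOne, ih k]
      rcases pvLast_cases xs with h | h
      · simp [h]
        split <;> omega
      · have hne : ¬ pvLastOne xs = -1 := by omega
        simp [hne] <;> omega

theorem pvFirst_neg_iff (l : List Int) : pvFirstOne l = -1 ↔ 1 ∉ l := by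
  induction l with
  | nil => simp [pvFirstOne]
  | cons x xs ih =>
    simp only [pvFirstOne, List.mem_cons]
    by_cases hx : x = 1
    · simp [hx]
    · have hx' : ¬ ((1 : Int) = x) := fun h => hx h.symm
      rcases pvFirst_cases xs with h | h
      · have hxs : 1 ∉ xs := ih.mp h
        simp [hx, hx', h, hxs]
      · have hne : ¬ pvFirstOne xs = -1 := by omega
        have hxs : 1 ∈ xs := by
          by_contra hmm; exact hne (ih.mpr hmm)
        simp [hx, hx', hne, hxs]
        omega

theorem pvLast_neg_iff (l : List Int) : pvLastOne l = -1 ↔ 1 ∉ l := by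
  have := pvLast_drop_iff l 0
  rw [List.drop_zero] at this
  rcases pvLast_cases l with h | h
  · simp [h]; intro hm
    have := this.mp hm; omega
  · constructor
    · intro h1; omega
    · intro hm
      exfalso; apply hm; rw [this]; omega

theorem pvFirst_get (l : List Int) (h : 1 ∈ l) : l[(pvFirstOne l).toNat]? = some 1 := by
  have hd : 0 ≤ pvFirstOne l := by
    rcases pvFirst_cases l with h1 | h1
    · exact absurd ((pvFirst_neg_iff l).mp h1) (by simp [h])
    · exact h1
  have h1 : 1 ∈ l.take ((pvFirstOne l).toNat + 1) := by
    rw [pvFirst_take_iff]; exact ⟨hd, by omega⟩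
  have h2 : 1 ∉ l.take (pvFirstOne l).toNat := by
    rw [pvFirst_take_iff]; intro hc; omega
  rw [List.take_add_one] at h1
  rcases List.mem_append.mp h1 with h3 | h3
  · exact absurd h3 h2
  · simpa using h3

theorem pvLast_get (l : List Int) (h : 1 ∈ l) : l[(pvLastOne l).toNat]? = some 1 := by
  have hf : 0 ≤ pvLastOne l := by
    rcases pvLast_cases l with h1 | h1
    · exact absurd ((pvLast_neg_iff l).mp h1) (by simp [h])
    · exact h1
  have h1 : 1 ∈ l.drop (pvLastOne l).toNat := by
    rw [pvLast_drop_iff]; omega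
  have h2 : 1 ∉ l.drop ((pvLastOne l).toNat + 1) := by
    rw [pvLast_drop_iff]; intro hc; omega
  have hlt : (pvLastOne l).toNat < l.length := by
    by_contra hge
    rw [List.drop_eq_nil_of_le (Nat.le_of_not_lt hge)] at h1
    exact absurd h1 (by simp)
  rw [List.drop_eq_getElem_cons hlt] at h1
  rcases List.mem_cons.mp h1 with h3 | h3
  · rw [List.getElem?_eq_getElem hlt, ← h3]
  · exact absurd h3 h2

theorem pvFill_get : ∀ (n : Nat) (l : List Int) (d f : Int), 0 ≤ d → (f + 1 - d).toNat = n →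
    ∀ k : Nat, ((PySem.List.pyRange d (f + 1) 1).foldl pvFillStep l)[k]? =
      if d ≤ (k : Int) ∧ (k : Int) ≤ f ∧ l[k]? = some 0 then some 1 else l[k]? := by
  intro n
  induction n with
  | zero =>
    intro l d f hd hn k
    rw [PySem.List.pyRange_one_eq_nil (by omega)]
    simp only [List.foldl_nil]
    split
    · rename_i h; omega
    · rfl
  | succ n ih =>
    intro l d f hd hn k
    rw [PySem.List.pyRange_one_cons (by omega)]
    simp only [List.foldl_cons]
    have hstep : ∀ k' : Nat, (pvFillStep l d)[k']? =
        if k' = d.toNat ∧ l[k']? = some 0 then some 1 else l[k']? := by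
      intro k'
      simp only [pvFillStep, PySem.List.pyGet?_of_nonneg l hd]
      by_cases h0 : l[d.toNat]? = some 0
      · rw [if_pos h0, List.getElem?_set]
        by_cases hk : d.toNat = k'
        · subst hk
          obtain ⟨hlt, -⟩ := List.getElem?_eq_some_iff.mp h0
          rw [if_pos rfl, if_pos hlt, if_pos (And.intro rfl h0)]
        · have hk' : ¬ k' = d.toNat := fun h => hk h.symm
          rw [if_neg hk, if_neg (fun h => hk' h.1)]
      · rw [if_neg h0]
        by_cases hk : k' = d.toNat
        · rw [if_neg (fun h : k' = d.toNat ∧ l[k']? = some 0 => h0 (hk ▸ h.2))]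
        · rw [if_neg (fun h => hk h.1)]
    rw [ih (pvFillStep l d) (d + 1) f (by omega) (by omega) k, hstep k]
    by_cases hk : k = d.toNat
    · by_cases h0 : l[k]? = some 0
      · rw [if_pos (And.intro hk h0),
            if_pos (show d ≤ (k : Int) ∧ (k : Int) ≤ f ∧ l[k]? = some 0 from ⟨by omega, by omega, h0⟩),
            ite_self]
      · rw [if_neg (fun h : k = d.toNat ∧ l[k]? = some 0 => h0 h.2),
            if_neg (show ¬ (d + 1 ≤ (k : Int) ∧ (k : Int) ≤ f ∧ l[k]? = some 0) from fun h => h0 h.2.2),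
            if_neg (show ¬ (d ≤ (k : Int) ∧ (k : Int) ≤ f ∧ l[k]? = some 0) from fun h => h0 h.2.2)]
    · rw [if_neg (fun h : k = d.toNat ∧ l[k]? = some 0 => hk h.1)]
      by_cases hc : d ≤ (k : Int) ∧ (k : Int) ≤ f ∧ l[k]? = some 0
      · rw [if_pos (show d + 1 ≤ (k : Int) ∧ (k : Int) ≤ f ∧ l[k]? = some 0 from
              ⟨by omega, hc.2.1, hc.2.2⟩), if_pos hc]
      · rw [if_neg (show ¬ (d + 1 ≤ (k : Int) ∧ (k : Int) ≤ f ∧ l[k]? = some 0) from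
              fun h => hc ⟨by omega, h.2.1, h.2.2⟩), if_neg hc]

theorem pvA_eq (l : List Int) : correct_innacurate_classif l = pvSpec false l := by
  unfold correct_innacurate_classif
  by_cases hlen : l.length = 0
  · rw [if_pos hlen]
    rw [List.length_eq_zero_iff.mp hlen]
    simp [pvSpec]
  · rw [if_neg hlen]
    by_cases hC : pvFirstOne l ≠ -1 ∧ pvLastOne l ≠ -1 ∧ pvFirstOne l < pvLastOne l
    · rw [if_pos hC]
      have hmem : 1 ∈ l := by
        by_contra hm
        exact hC.1 ((pvFirst_neg_iff l).mpr hm)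
      have hd0 : 0 ≤ pvFirstOne l := by
        rcases pvFirst_cases l with h | h
        · exact absurd h hC.1
        · exact h
      have hf0 : 0 ≤ pvLastOne l := by omega
      apply List.ext_getElem?
      intro k
      rw [pvFill_get ((pvLastOne l + 1) - pvFirstOne l).toNat l (pvFirstOne l) (pvLastOne l) hd0 rfl k]
      rw [pvSpec_get l false k]
      rcases h0 : l[k]? with _ | x
      · rw [if_neg (show ¬ (pvFirstOne l ≤ (k : Int) ∧ (k : Int) ≤ pvLastOne l ∧
              (none : Option Int) = some 0) from fun h => by simpa using h.2.2)]
        simp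
      · simp only [Option.map_some]
        by_cases hx1 : x = 1
        · subst hx1
          rw [if_neg (show ¬ (pvFirstOne l ≤ (k : Int) ∧ (k : Int) ≤ pvLastOne l ∧
                (some (1 : Int)) = some 0) from fun h => by simpa using h.2.2)]
          simp
        · by_cases hx0 : x = 0
          · subst hx0
            have htake : (1 ∈ l.take k) ↔ (0 ≤ pvFirstOne l ∧ pvFirstOne l < (k : Int)) := pvFirst_take_iff l k
            have hdrop : (1 ∈ l.drop (k + 1)) ↔ (((k : Nat) + 1 : Int) ≤ pvLastOne l) := by
              have := pvLast_drop_iff l (k + 1)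
              simpa using this
            have hkd : k ≠ (pvFirstOne l).toNat := by
              intro h
              have := pvFirst_get l hmem
              rw [← h, h0] at this
              exact absurd this (by simp)
            have hkf : k ≠ (pvLastOne l).toNat := by
              intro h
              have := pvLast_get l hmem
              rw [← h, h0] at this
              exact absurd this (by simp)
            by_cases hc : pvFirstOne l ≤ (k : Int) ∧ (k : Int) ≤ pvLastOne l
            · rw [if_pos (show pvFirstOne l ≤ (k : Int) ∧ (k : Int) ≤ pvLastOne l ∧
                    (some (0 : Int)) = some 0 from ⟨hc.1, hc.2, rfl⟩)]
              have h1 : 1 ∈ l.take k := htake.mpr ⟨hd0, by omega⟩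
              have h2 : 1 ∈ l.drop (k + 1) := hdrop.mpr (by omega)
              simp [h1, h2]
            · have hni : ¬ (1 ∈ l.take k ∧ 1 ∈ l.drop (k + 1)) := by
                intro h12
                have ht := htake.mp h12.1
                have hdr := hdrop.mp h12.2
                exact hc ⟨by omega, by omega⟩
              rw [if_neg (show ¬ (pvFirstOne l ≤ (k : Int) ∧ (k : Int) ≤ pvLastOne l ∧
                    (some (0 : Int)) = some 0) from fun h => hc ⟨h.1, h.2.1⟩)]
              simp
              intro h1 h2
              exact absurd ⟨h1, h2⟩ hni
          · rw [if_neg (show ¬ (pvFirstOne l ≤ (k : Int) ∧ (k : Int) ≤ pvLastOne l ∧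
                  (some x) = some 0) from fun h => hx0 (by simpa using h.2.2))]
            simp [hx1, hx0]
    · rw [if_neg hC]
      -- here A returns l unchanged; show pvSpec false l = l
      symm
      apply List.ext_getElem?
      intro k
      rw [pvSpec_get l false k]
      rcases h0 : l[k]? with _ | x
      · simp
      · simp only [Option.map_some]
        by_cases hx1 : x = 1
        · simp [hx1]
        · by_cases hx0 : x = 0
          · subst hx0
            rw [if_neg hx1]
            rw [if_neg (by
              intro h
              rcases h.2.1 with h1 | h1
              · exact Bool.noConfusion h1
              · have ht := (pvFirst_take_iff l k).mp h1
                have hdr := (pvLast_drop_iff l (k + 1)).mp h.2.2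
                apply hC
                refine ⟨by omega, by omega, by omega⟩)]
          · simp [hx1, hx0]

-- ===== VERDICT (by name: the statement is the Claim_ definition above) =====
theorem correct_innacurate_classif_spec : Claim_equal_correct_innacurate_classif := by
  intro l _
  unfold Spec_correct_innacurate_classif
  rw [pvA_eq l, pvB_eq l]
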